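-- pv_equiv track=rewrite | github.com/raphael-group/dialect | analysis/top_ranking_pairs_tex_table.py | build_subtable_latex
-- ===== SOURCE A (Python) =====
-- def build_subtable_latex(methods_list, top_pairs_by_method, metric_labels):
--     """
--     Builds a LaTeX fragment for the given set of methods in a single row of columns.
--     E.g., ["DIALECT","DISCOVER","Fisher's Exact Test"] -> a 3-method tabular.
--     """
--     num_methods = len(methods_list)
--     col_spec = "||".join(["cc"] * num_methods)
--
--     lines = []
--     lines.append(r"\renewcommand{\arraystretch}{1.2}")  # Slightly bigger spacing
--     lines.append(r"\begin{tabular}{" + col_spec + r"}")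
--     lines.append(r"\hline")
--
--     header_parts = []
--     for method in methods_list:
--         header_parts.append(r"\multicolumn{2}{c}{" + method + "}")
--     lines.append(" & ".join(header_parts) + r" \\ \hline")
--
--     subheader_parts = []
--     for method in methods_list:
--         subheader_parts.append("ME Gene Pair")
--         subheader_parts.append(metric_labels[method])
--     lines.append(" & ".join(subheader_parts) + r" \\ \hline")
--
--     max_rows = max(len(top_pairs_by_method[m]) for m in methods_list)
--     for i in range(max_rows):
--         row_entries = []
--         for method in methods_list:
--             pairs_list = top_pairs_by_method[method]
--             if i < len(pairs_list):
--                 pair_str, val_str = pairs_list[i]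
--                 row_entries.append(pair_str)
--                 row_entries.append(val_str)
--             else:
--                 row_entries.append("")
--                 row_entries.append("")
--         lines.append(" & ".join(row_entries) + r" \\")
--
--     lines.append(r"\hline")
--     lines.append(r"\end{tabular}")
--     return "\n".join(lines)
-- ===== SOURCE B (Python) =====
-- from functools import reduce
--
--
-- def build_subtable_latex(methods_list, top_pairs_by_method, metric_labels):
--     """Column-major rebuild: each method yields its full vertical strip
--     (header cell, subheader cells, padded body cells, already joined per
--     method), and a reduce merges the strips horizontally row by row."""
--     max_rows = max(len(top_pairs_by_method[m]) for m in methods_list)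
--
--     def strip(m):
--         pairs = top_pairs_by_method[m]
--         return (
--             [r"\multicolumn{2}{c}{" + m + "}",
--              "ME Gene Pair & " + metric_labels[m]]
--             + [p + " & " + v for p, v in pairs]
--             + [" & "] * (max_rows - len(pairs))
--         )
--
--     merged = reduce(
--         lambda left, right: [a + " & " + b for a, b in zip(left, right)],
--         (strip(m) for m in methods_list),
--     )
--     body = [merged[0] + r" \\ \hline", merged[1] + r" \\ \hline"] + [
--         r + r" \\" for r in merged[2:]
--     ]
--     return "\n".join(
--         [r"\renewcommand{\arraystretch}{1.2}",
--          r"\begin{tabular}{" + "||".join(["cc"] * len(methods_list)) + r"}",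
--          r"\hline"]
--         + body
--         + [r"\hline", r"\end{tabular}"]
--     )
-- ===== Notes on version B (the rewrite author's own statement) =====
-- stated objective: alternative
-- what changed: A builds the table row-major (for each row index, an inner loop over methods with explicit 'if i < len' padding); B builds it column-major: each method yields its complete vertical strip of pre-joined cells (header, subheader, padded body) and functools.reduce merges the strips horizontally with zip, then the frame is wrapped around the merged rows.
import Mathlib
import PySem

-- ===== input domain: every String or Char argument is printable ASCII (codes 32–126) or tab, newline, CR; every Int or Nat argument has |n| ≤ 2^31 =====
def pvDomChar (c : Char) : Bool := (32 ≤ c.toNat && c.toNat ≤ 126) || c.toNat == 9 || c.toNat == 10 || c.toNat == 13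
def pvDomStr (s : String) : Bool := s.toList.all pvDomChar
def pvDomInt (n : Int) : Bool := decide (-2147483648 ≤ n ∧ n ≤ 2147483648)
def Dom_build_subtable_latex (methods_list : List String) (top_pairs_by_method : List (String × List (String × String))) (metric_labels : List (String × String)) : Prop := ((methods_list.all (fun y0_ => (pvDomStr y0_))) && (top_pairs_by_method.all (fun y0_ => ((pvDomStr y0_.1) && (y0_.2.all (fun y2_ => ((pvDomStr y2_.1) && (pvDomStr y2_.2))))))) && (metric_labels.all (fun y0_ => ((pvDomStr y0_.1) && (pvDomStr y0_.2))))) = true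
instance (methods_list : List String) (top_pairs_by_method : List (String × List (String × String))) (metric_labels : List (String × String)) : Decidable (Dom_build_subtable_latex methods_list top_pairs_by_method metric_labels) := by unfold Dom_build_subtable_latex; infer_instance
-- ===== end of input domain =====

-- B rebuilds the table column-major: each method contributes a full vertical strip
-- (header cell, joined subheader, padded joined body cells) and a reduce merges the
-- strips horizontally row by row; objective: alternative decomposition, same cost.


-- ===== PORT A =====
-- dict lookup d[k] (first match on the association list); total with a default,
-- exact under Pre_ (which requires the key to be present, as Python's KeyError demands)
def pvLookupD {α : Type} (d : List (String × α)) (k : String) (dflt : α) : α :=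
  (d.lookup k).getD dflt

-- literal transliteration of A: append-loops as foldl, max(...) over a NONEMPTY list of
-- Nat lengths as foldl Nat.max 0 (equal to Python's max there; Pre_ gives nonemptiness)
def build_subtable_latex (methods_list : List String) (top_pairs_by_method : List (String × List (String × String))) (metric_labels : List (String × String)) : String :=
  let num_methods := methods_list.length
  let col_spec := PySem.Str.join "||" (List.replicate num_methods "cc")
  let lines : List String := []
  let lines := lines ++ ["\\renewcommand{\\arraystretch}{1.2}"]
  let lines := lines ++ ["\\begin{tabular}{" ++ col_spec ++ "}"]
  let lines := lines ++ ["\\hline"]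
  let header_parts := methods_list.foldl (fun acc method => acc ++ ["\\multicolumn{2}{c}{" ++ method ++ "}"]) []
  let lines := lines ++ [PySem.Str.join " & " header_parts ++ " \\\\ \\hline"]
  let subheader_parts := methods_list.foldl (fun acc method => acc ++ ["ME Gene Pair", pvLookupD metric_labels method ""]) []
  let lines := lines ++ [PySem.Str.join " & " subheader_parts ++ " \\\\ \\hline"]
  let max_rows := (methods_list.map (fun m => (pvLookupD top_pairs_by_method m []).length)).foldl Nat.max 0
  let lines := (List.range max_rows).foldl (fun acc i =>
    let row_entries := methods_list.foldl (fun r method =>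
      let pairs_list := pvLookupD top_pairs_by_method method []
      match pairs_list[i]? with
      | some pv => r ++ [pv.1, pv.2]
      | none => r ++ ["", ""]) []
    acc ++ [PySem.Str.join " & " row_entries ++ " \\\\"]) lines
  let lines := lines ++ ["\\hline"]
  let lines := lines ++ ["\\end{tabular}"]
  PySem.Str.join "\n" lines

-- ===== PORT B =====
-- one method's full vertical strip: header cell, joined subheader cell,
-- joined body cells, padding to max_rows (Source B's strip(m))
def pvStrip (top_pairs_by_method : List (String × List (String × String))) (metric_labels : List (String × String)) (max_rows : Nat) (m : String) : List String :=
  let pairs := pvLookupD top_pairs_by_method m []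
  ["\\multicolumn{2}{c}{" ++ m ++ "}",
   "ME Gene Pair & " ++ pvLookupD metric_labels m ""]
  ++ pairs.map (fun pv => pv.1 ++ " & " ++ pv.2)
  ++ List.replicate (max_rows - pairs.length) " & "

-- the reduce step: merge two strips horizontally (Source B's lambda with zip)
def pvMerge (left right : List String) : List String :=
  (left.zip right).map (fun ab => ab.1 ++ " & " ++ ab.2)

-- functools.reduce(merge, strips): reduce over an empty methods_list raises in Python
-- (TypeError), so the [] branch is unreachable under Pre_
def pvReduce (strips : List (List String)) : List String :=
  match strips with
  | [] => []
  | s :: rest => rest.foldl pvMerge s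

-- Source B's body list from merged (merged[0], merged[1], merged[2:]); merged always has
-- ≥ 2 rows when methods_list is nonempty, so the catch-all is unreachable under Pre_
def pvBody (merged : List String) : List String :=
  match merged with
  | h :: s :: rest => (h ++ " \\\\ \\hline") :: (s ++ " \\\\ \\hline") :: rest.map (fun r => r ++ " \\\\")
  | _ => []

-- literal transliteration of B (from Source B)
def build_subtable_latex_alt (methods_list : List String) (top_pairs_by_method : List (String × List (String × String))) (metric_labels : List (String × String)) : String :=
  let max_rows := (methods_list.map (fun m => (pvLookupD top_pairs_by_method m []).length)).foldl Nat.max 0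
  let merged := pvReduce (methods_list.map (pvStrip top_pairs_by_method metric_labels max_rows))
  let body := pvBody merged
  PySem.Str.join "\n"
    (["\\renewcommand{\\arraystretch}{1.2}",
      "\\begin{tabular}{" ++ PySem.Str.join "||" (List.replicate methods_list.length "cc") ++ "}",
      "\\hline"]
     ++ body
     ++ ["\\hline", "\\end{tabular}"])

-- ===== PRECONDITION & SPEC =====
-- Pre_ excludes exactly the inputs where the Python A raises: an empty methods_list
-- (max() of an empty sequence is a ValueError) and a method missing from either dict (KeyError).
def Pre_build_subtable_latex (methods_list : List String) (top_pairs_by_method : List (String × List (String × String))) (metric_labels : List (String × String)) : Prop :=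
  methods_list ≠ [] ∧
  ∀ m ∈ methods_list, (metric_labels.lookup m).isSome ∧ (top_pairs_by_method.lookup m).isSome
instance (methods_list : List String) (top_pairs_by_method : List (String × List (String × String))) (metric_labels : List (String × String)) : Decidable (Pre_build_subtable_latex methods_list top_pairs_by_method metric_labels) := by unfold Pre_build_subtable_latex; infer_instance

def pvWitness_build_subtable_latex : List String × (List (String × List (String × String))) × (List (String × String)) :=
  (["M1", "M2"], [("M1", [("A:B", "0.1"), ("C:D", "0.2")]), ("M2", [("E:F", "7")])], [("M1", "p"), ("M2", "q")])

def Spec_build_subtable_latex (methods_list : List String) (top_pairs_by_method : List (String × List (String × String))) (metric_labels : List (String × String)) (out : String) : Prop := out = build_subtable_latex_alt methods_list top_pairs_by_method metric_labels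
instance (methods_list : List String) (top_pairs_by_method : List (String × List (String × String))) (metric_labels : List (String × String)) (out : String) : Decidable (Spec_build_subtable_latex methods_list top_pairs_by_method metric_labels out) := by unfold Spec_build_subtable_latex; infer_instance

-- ===== CLAIM (what is proved, stated in full; the proofs are below) =====
def Claim_equal_build_subtable_latex : Prop := ∀ (methods_list : List String) (top_pairs_by_method : List (String × List (String × String))) (metric_labels : List (String × String)), Dom_build_subtable_latex methods_list top_pairs_by_method metric_labels → Pre_build_subtable_latex methods_list top_pairs_by_method metric_labels → Spec_build_subtable_latex methods_list top_pairs_by_method metric_labels (build_subtable_latex methods_list top_pairs_by_method metric_labels)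

-- ===== LEMMAS AND PROOFS =====

-- join over a nonempty list, written as the left fold B's reduce performs
theorem pv_join_cons_cons (sep a b : String) (l : List String) :
    PySem.Str.join sep (a :: b :: l) = a ++ sep ++ PySem.Str.join sep (b :: l) := by
  simp [PySem.Str.join, PySem.Chars.join_cons_cons, String.append_assoc]

theorem pv_join_singleton (sep a : String) : PySem.Str.join sep [a] = a := by
  simp [PySem.Str.join, PySem.Chars.join, List.intercalate]

theorem pv_foldl_hoist (sep c : String) (ys : List String) (y : String) :
    c ++ sep ++ ys.foldl (fun a b => a ++ sep ++ b) y
      = ys.foldl (fun a b => a ++ sep ++ b) (c ++ sep ++ y) := by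
  induction ys generalizing y with
  | nil => rfl
  | cons z zs ih =>
    simp only [List.foldl_cons]
    rw [ih]
    congr 1
    simp [String.append_assoc]

theorem pv_join_foldl (sep : String) (x : String) (xs : List String) :
    PySem.Str.join sep (x :: xs) = xs.foldl (fun a b => a ++ sep ++ b) x := by
  induction xs generalizing x with
  | nil => simp [pv_join_singleton]
  | cons y ys ih =>
    rw [pv_join_cons_cons, ih, List.foldl_cons, pv_foldl_hoist]

-- joining a flatMap of two-cell blocks equals joining the per-block joined cells
theorem pv_join_pairs (sep : String) {α : Type} (f g : α → String) (ms : List α) :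
    PySem.Str.join sep (ms.flatMap (fun m => [f m, g m]))
      = PySem.Str.join sep (ms.map (fun m => f m ++ sep ++ g m)) := by
  induction ms with
  | nil => rfl
  | cons m rest ih =>
    cases rest with
    | nil => simp [pv_join_cons_cons, pv_join_singleton]
    | cons m' rest' =>
      simp only [List.flatMap_cons, List.map_cons, List.cons_append, List.nil_append] at ih ⊢
      rw [pv_join_cons_cons sep (f m), pv_join_cons_cons sep (g m), ih,
        pv_join_cons_cons sep (f m ++ sep ++ g m)]
      simp [String.append_assoc]

-- the body cell of method m in row j, with Python's padding-by-default built in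
def pvCell (top_pairs_by_method : List (String × List (String × String))) (m : String) (j : Nat) : String :=
  ((pvLookupD top_pairs_by_method m []).getD j ("", "")).1 ++ " & " ++ ((pvLookupD top_pairs_by_method m []).getD j ("", "")).2

-- a strip is header cell, subheader cell, then one padded body cell per row index
theorem pv_strip_eq (top_pairs_by_method : List (String × List (String × String))) (metric_labels : List (String × String)) (n : Nat) (m : String)
    (h : (pvLookupD top_pairs_by_method m []).length ≤ n) :
    pvStrip top_pairs_by_method metric_labels n m
      = ("\\multicolumn{2}{c}{" ++ m ++ "}") :: ("ME Gene Pair & " ++ pvLookupD metric_labels m "")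
        :: (List.range n).map (pvCell top_pairs_by_method m) := by
  unfold pvStrip
  simp only [List.cons_append, List.nil_append, List.cons.injEq, true_and]
  set pairs := pvLookupD top_pairs_by_method m [] with hp
  apply List.ext_getElem
  · simp; omega
  · intro j h1 h2
    simp only [List.getElem_map, List.getElem_range]
    by_cases hj : j < pairs.length
    · rw [List.getElem_append_left (by simpa using hj)]
      simp [pvCell, ← hp, List.getD, List.getElem?_eq_getElem hj]
    · rw [List.getElem_append_right (by simpa using hj)]
      simp only [List.getElem_replicate]
      rw [pvCell, ← hp, List.getD_eq_default _ _ (by omega)]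
      simp

theorem pv_merge_length (s l : List String) (h : l.length = s.length) :
    (pvMerge s l).length = s.length := by
  simp [pvMerge, h]

-- the reduce of pvMerge over equal-length strips, characterised pointwise
theorem pv_foldl_merge (L : List (List String)) (s : List String)
    (h : ∀ l ∈ L, l.length = s.length) :
    L.foldl pvMerge s
      = s.mapIdx (fun i a => L.foldl (fun acc l => acc ++ " & " ++ l.getD i "") a) := by
  induction L generalizing s with
  | nil =>
    apply List.ext_getElem <;> simp
  | cons l L ih =>
    simp only [List.foldl_cons]
    rw [ih _ (by intro l' hl'; rw [pv_merge_length s l (h l (by simp))]; exact h l' (by simp [hl']))]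
    apply List.ext_getElem
    · simp [pv_merge_length s l (h l (by simp))]
    · intro i h1 h2
      have hl : l.length = s.length := h l (by simp)
      have hi : i < s.length := by simpa [pv_merge_length s l (h l (by simp))] using h1
      simp only [List.getElem_mapIdx]
      congr 1
      simp [pvMerge, List.getD, List.getElem?_eq_getElem (show i < l.length by omega)]

-- A's inner row loop is a flatMap of padded cells
theorem pvRowA_eq (top_pairs_by_method : List (String × List (String × String)))
    (ms : List String) (i : Nat) (acc : List String) :
    ms.foldl (fun r method =>
        match (pvLookupD top_pairs_by_method method [])[i]? with
        | some pv => r ++ [pv.1, pv.2]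
        | none => r ++ ["", ""]) acc
      = acc ++ ms.flatMap (fun method =>
          [((pvLookupD top_pairs_by_method method []).getD i ("", "")).1,
           ((pvLookupD top_pairs_by_method method []).getD i ("", "")).2]) := by
  induction ms generalizing acc with
  | nil => simp
  | cons m rest ih =>
    simp only [List.foldl_cons, List.flatMap_cons]
    rw [ih]
    cases hx : (pvLookupD top_pairs_by_method m [])[i]? with
    | none => simp [List.getD, hx]
    | some pv => simp [List.getD, hx]

-- mapIdx over a range-map is a range-map with the index passed through
theorem pv_mapIdx_map_range {α β : Type} (n : Nat) (f : Nat → α) (F : Nat → α → β) :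
    ((List.range n).map f).mapIdx (fun j a => F j a) = (List.range n).map (fun j => F j (f j)) := by
  apply List.ext_getElem
  · simp
  · intro j h1 h2
    simp [List.getElem_mapIdx]

theorem build_subtable_latex_eq (m0 : String) (rest : List String) (top_pairs_by_method : List (String × List (String × String))) (metric_labels : List (String × String)) :
    build_subtable_latex (m0 :: rest) top_pairs_by_method metric_labels
      = build_subtable_latex_alt (m0 :: rest) top_pairs_by_method metric_labels := by
  simp only [build_subtable_latex, build_subtable_latex_alt, List.map_cons]
  set n := List.foldl Nat.max 0 ((pvLookupD top_pairs_by_method m0 []).length :: (rest.map (fun m => (pvLookupD top_pairs_by_method m []).length))) with hn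
  have hcol : ∀ m ∈ (m0 :: rest), (pvLookupD top_pairs_by_method m []).length ≤ n := by
    intro m hm
    exact (PySem.List.le_foldl_max _ 0).2 _
      (by simpa using List.mem_map_of_mem (f := fun m => (pvLookupD top_pairs_by_method m []).length) hm)
  have hstrip : ∀ m ∈ (m0 :: rest), pvStrip top_pairs_by_method metric_labels n m
      = ("\\multicolumn{2}{c}{" ++ m ++ "}") :: ("ME Gene Pair & " ++ pvLookupD metric_labels m "")
        :: (List.range n).map (pvCell top_pairs_by_method m) :=
    fun m hm => pv_strip_eq _ _ _ _ (hcol m hm)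
  have hlen : ∀ l ∈ rest.map (pvStrip top_pairs_by_method metric_labels n),
      l.length = (pvStrip top_pairs_by_method metric_labels n m0).length := by
    intro l hl
    obtain ⟨m, hm, rfl⟩ := List.mem_map.mp hl
    rw [hstrip m (by simp [hm]), hstrip m0 (by simp)]
    simp
  have hgetD : ∀ (j : Nat), j < n → ∀ m ∈ (m0 :: rest),
      (pvStrip top_pairs_by_method metric_labels n m).getD (j + 1 + 1) "" = pvCell top_pairs_by_method m j := by
    intro j hj m hm
    rw [hstrip m hm]
    simp [List.getD, List.getElem?_eq_getElem (by simpa using hj : j < ((List.range n).map (pvCell top_pairs_by_method m)).length)]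
  have hmerged : (rest.map (pvStrip top_pairs_by_method metric_labels n)).foldl pvMerge (pvStrip top_pairs_by_method metric_labels n m0)
      = (PySem.Str.join " & " ((m0 :: rest).map (fun m => "\\multicolumn{2}{c}{" ++ m ++ "}")))
        :: (PySem.Str.join " & " ((m0 :: rest).map (fun m => "ME Gene Pair & " ++ pvLookupD metric_labels m "")))
        :: (List.range n).map (fun j => PySem.Str.join " & " ((m0 :: rest).map (fun m => pvCell top_pairs_by_method m j))) := by
    rw [pv_foldl_merge _ _ hlen, hstrip m0 (by simp), List.mapIdx_cons, List.mapIdx_cons]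
    congr 1
    · -- row 0: the header cells
      rw [List.map_cons, pv_join_foldl, List.foldl_map, List.foldl_map]
      refine PySem.List.foldl_congr_mem _ _ _ _ ?_
      intro acc m hm
      rw [hstrip m (by simp [hm])]
      rfl
    · congr 1
      · -- row 1: the subheader cells
        rw [List.map_cons, pv_join_foldl, List.foldl_map, List.foldl_map]
        refine PySem.List.foldl_congr_mem _ _ _ _ ?_
        intro acc m hm
        rw [hstrip m (by simp [hm])]
        rfl
      · -- body rows
        rw [pv_mapIdx_map_range]
        apply List.map_congr_left
        intro j hj
        rw [List.map_cons, pv_join_foldl, List.foldl_map, List.foldl_map]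
        refine PySem.List.foldl_congr_mem _ _ _ _ ?_
        intro acc m hm
        rw [hgetD j (List.mem_range.mp hj) m (by simp [hm])]
  simp only [pvReduce]
  rw [hmerged]
  simp only [pvBody]
  congr 1
  simp only [PySem.List.foldl_append_singleton_eq_map, List.nil_append,
    PySem.List.foldl_append_eq_flatMap, pvRowA_eq, List.map_map, Function.comp_def]
  simp only [List.append_assoc, List.cons_append, List.nil_append]
  simp only [pv_join_pairs, pvCell]
  rfl

-- ===== VERDICT (by name: the statement is the Claim_ definition above) =====
theorem build_subtable_latex_spec : Claim_equal_build_subtable_latex := by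
  intro ms tp ml _ hpre
  cases ms with
  | nil => exact absurd rfl hpre.1
  | cons m0 rest => exact build_subtable_latex_eq m0 rest tp ml
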